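-- pv_equiv track=rewrite | github.com/DEBARGHYA4469/quantum-compiler | Synthesis_of_Gates/nontrivial.py | ntvl
-- ===== SOURCE A (Python) =====
-- def MOD(m,n): # speacial mod
-- 	if(m % n == 0): return n
-- 	else : return m % n
--
-- def ntvl(k,l,n): # k,l columns of non-trivial elements of n qubits
-- 	d = 2**n # total no of qubits possible
--
-- 	g1 = ''
-- 	gm = ''
--
-- 	r=1
-- 	while(r <= n):
-- 		u = (n-r+1)
-- 		if(MOD(k,2**u) <= 2**(u-1)): g1 = g1 + '0'
-- 		if(MOD(k,2**u) > 2**(u-1)): g1 = g1 + '1'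
-- 		if(MOD(l,2**u) <=  2**(u-1)): gm = gm + '0'
-- 		if(MOD(l,2**u) > 2**(u-1)): gm = gm + '1'
-- 		r = r + 1
-- 	return g1,gm
-- ===== SOURCE B (Python) =====
-- def ntvl(k, l, n):  # k,l columns of non-trivial elements of n qubits
--     # closed form: g1/gm are the n-bit binary representations (MSB first)
--     # of (k-1) mod 2**n and (l-1) mod 2**n
--     if n <= 0:
--         return '', ''
--     d = 1 << n
--     fmt = '0{}b'.format(n)
--     return format((k - 1) % d, fmt), format((l - 1) % d, fmt)
-- ===== Notes on version B (the rewrite author's own statement) =====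
-- stated objective: faster
-- what changed: Replaces the per-bit while loop with its special MOD and fresh 2**u powers each iteration by a closed form: each output is the zero-padded n-bit binary string of (k-1) mod 2**n (resp. (l-1) mod 2**n), produced by a single mod and one format call.
import Mathlib
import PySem

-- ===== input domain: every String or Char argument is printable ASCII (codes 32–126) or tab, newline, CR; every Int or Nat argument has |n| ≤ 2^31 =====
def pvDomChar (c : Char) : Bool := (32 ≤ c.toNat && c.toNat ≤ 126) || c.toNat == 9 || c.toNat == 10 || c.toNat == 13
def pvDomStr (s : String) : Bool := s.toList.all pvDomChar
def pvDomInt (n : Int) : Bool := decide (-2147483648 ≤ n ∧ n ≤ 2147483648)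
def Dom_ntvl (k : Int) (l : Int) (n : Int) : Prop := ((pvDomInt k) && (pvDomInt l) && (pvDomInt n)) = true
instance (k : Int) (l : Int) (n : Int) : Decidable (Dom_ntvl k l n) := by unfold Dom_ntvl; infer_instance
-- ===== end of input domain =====

-- B replaces A's per-bit loop by a closed form: each output is the n-bit binary
-- string of (k-1) mod 2**n resp. (l-1) mod 2**n (objective: faster).

-- ===== PORT A =====
-- MOD(m,n): the "special mod" helper
def pyMOD (m n : Int) : Int := if PySem.Int.mod m n = 0 then n else PySem.Int.mod m n

-- the while loop, fuel-guarded (fuel = number of remaining iterations)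
def ntvlLoop (k l n : Int) (r : Int) (g1 gm : String) : Nat → String × String
  | 0 => (g1, gm)
  | fuel + 1 =>
    if r ≤ n then
      let u : Nat := (n - r + 1).toNat
      let g1 := if pyMOD k ((2:Int)^u) ≤ (2:Int)^(u-1) then g1 ++ "0" else g1
      let g1 := if pyMOD k ((2:Int)^u) > (2:Int)^(u-1) then g1 ++ "1" else g1
      let gm := if pyMOD l ((2:Int)^u) ≤ (2:Int)^(u-1) then gm ++ "0" else gm
      let gm := if pyMOD l ((2:Int)^u) > (2:Int)^(u-1) then gm ++ "1" else gm
      ntvlLoop k l n (r + 1) g1 gm fuel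
    else (g1, gm)

def ntvl (k : Int) (l : Int) (n : Int) : String × String :=
  -- d = 2**n is computed but never used in A (a float for n < 0); omitted
  ntvlLoop k l n 1 "" "" n.toNat

-- ===== PORT B =====
-- hand port of format(x, 'b') for x ≥ 0: binary digits of x, MSB first (exact on Nat)
def fmtBin (x : Nat) : List Char :=
  if _h : x < 2 then [if x = 1 then '1' else '0']
  else fmtBin (x / 2) ++ [if x % 2 = 1 then '1' else '0']
decreasing_by exact Nat.div_lt_self (by omega) (by omega)

-- format(x, '0{n}b') = fmtBin x left-padded with '0' to length n
def fmtBinPad (x n : Nat) : String :=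
  String.ofList (List.replicate (n - (fmtBin x).length) '0' ++ fmtBin x)

def ntvl_alt (k : Int) (l : Int) (n : Int) : String × String :=
  if n ≤ 0 then ("", "")
  else
    let d : Int := (2:Int) ^ n.toNat
    (fmtBinPad (PySem.Int.mod (k - 1) d).toNat n.toNat,
     fmtBinPad (PySem.Int.mod (l - 1) d).toNat n.toNat)

-- ===== PRECONDITION & SPEC =====
def Spec_ntvl (k : Int) (l : Int) (n : Int) (out : String × String) : Prop := out = ntvl_alt k l n
instance (k : Int) (l : Int) (n : Int) (out : String × String) : Decidable (Spec_ntvl k l n out) := by unfold Spec_ntvl; infer_instance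

-- ===== CLAIM (what is proved, stated in full; the proofs are below) =====
def Claim_equal_ntvl : Prop := ∀ (k : Int) (l : Int) (n : Int), Dom_ntvl k l n → Spec_ntvl k l n (ntvl k l n)

-- ===== LEMMAS AND PROOFS =====

-- the common reference value: the m low bits of x, MSB first
def natBits : Nat → Nat → List Char
  | _, 0 => []
  | x, m + 1 => natBits (x / 2) m ++ [if x % 2 = 1 then '1' else '0']

theorem natBits_zero (m : Nat) : natBits 0 m = List.replicate m '0' := by
  induction m with
  | zero => rfl
  | succ m ih => simp [natBits, ih, List.replicate_succ']

theorem natBits_cons (x m : Nat) :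
    natBits x (m + 1) = (if x / 2 ^ m % 2 = 1 then '1' else '0') :: natBits x m := by
  induction m generalizing x with
  | zero => simp [natBits]
  | succ m ih =>
    show natBits (x / 2) (m + 1) ++ _ = _
    rw [ih (x / 2), Nat.div_div_eq_div_mul]
    simp [natBits, pow_succ, Nat.mul_comm]

theorem fmtBin_len (x m : Nat) (hx : x < 2 ^ m) (hm : 0 < m) : (fmtBin x).length ≤ m := by
  induction m generalizing x with
  | zero => omega
  | succ m ih =>
    rw [fmtBin]
    split
    · simp
    · rename_i h
      have hm' : 0 < m := by
        by_contra hc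
        have : m = 0 := by omega
        subst this; simp at hx; omega
      have := ih (x / 2) (by omega) hm'
      simp only [List.length_append, List.length_cons, List.length_nil]
      omega

theorem fmtBin_pad (x m : Nat) (hx : x < 2 ^ m) (hm : 0 < m) :
    List.replicate (m - (fmtBin x).length) '0' ++ fmtBin x = natBits x m := by
  induction m generalizing x with
  | zero => omega
  | succ m ih =>
    by_cases hm0 : m = 0
    · subst hm0
      rw [fmtBin]
      have hx2 : x < 2 := by simpa using hx
      simp only [dif_pos hx2, natBits, List.length_cons, List.length_nil]
      interval_cases x <;> simp
    · have hm' : 0 < m := by omega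
      rw [fmtBin]
      by_cases h2 : x < 2
      · simp only [dif_pos h2]
        show List.replicate (m + 1 - 1) '0' ++ _ = _
        have hx0 : x / 2 = 0 := by omega
        simp only [natBits, hx0, natBits_zero]
        have : x % 2 = x := by omega
        rw [this]
        norm_num
      · simp only [dif_neg h2]
        have hdiv : x / 2 < 2 ^ m := by
          have : x < 2 ^ m * 2 := by rw [← pow_succ]; exact hx
          omega
        have hlen := fmtBin_len (x / 2) m hdiv hm'
        have : m + 1 - (fmtBin (x / 2) ++ [if x % 2 = 1 then '1' else '0']).length
             = m - (fmtBin (x / 2)).length := by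
          simp only [List.length_append, List.length_cons, List.length_nil]; omega
        rw [this, natBits, ← List.append_assoc, ih (x / 2) hdiv hm']

-- x % 2^(m+1) ≥ 2^m iff bit m of x is 1
theorem mod_ge_iff (x m : Nat) : 2 ^ m ≤ x % 2 ^ (m + 1) ↔ x / 2 ^ m % 2 = 1 := by
  have h1 : x % (2 ^ m * 2) / 2 ^ m = x / 2 ^ m % 2 := Nat.mod_mul_right_div_self x (2 ^ m) 2
  have h2 : x % (2 ^ m * 2) < 2 ^ m * 2 := Nat.mod_lt _ (by positivity)
  have hp : 0 < (2:Nat) ^ m := by positivity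
  rw [pow_succ]
  constructor
  · intro h
    have := Nat.div_le_div_right (c := 2 ^ m) h
    rw [h1, Nat.div_self hp] at this
    omega
  · intro h
    rw [← h1] at h
    by_contra hc
    have : x % (2 ^ m * 2) / 2 ^ m = 0 := Nat.div_eq_of_lt (by omega)
    omega

-- the special MOD in terms of emod, for divisor ≥ 2
theorem pyMOD_eq (a N : Int) (hN : 2 ≤ N) : pyMOD a N = (a - 1) % N + 1 := by
  have hN0 : 0 < N := by omega
  unfold pyMOD
  rw [PySem.Int.mod_eq_emod_of_pos hN0]
  have hsub : (a - 1) % N = (a % N - 1) % N := by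
    conv_lhs => rw [show a - 1 = (a % N - 1) + N * (a / N) by rw [Int.emod_def]; ring]
    rw [Int.add_mul_emod_self_left]
  have hb0 : 0 ≤ a % N := Int.emod_nonneg a (by omega)
  have hbN : a % N < N := Int.emod_lt_of_pos a hN0
  by_cases h : a % N = 0
  · rw [if_pos h, hsub, h]
    have h1 : ((0:Int) - 1) % N = N - 1 := by
      rw [show (0:Int) - 1 = (N - 1) + N * (-1) by ring, Int.add_mul_emod_self_left,
        Int.emod_eq_of_lt (a := N - 1) (b := N) (by omega) (by omega)]
    omega
  · rw [if_neg h, hsub,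
      Int.emod_eq_of_lt (a := a % N - 1) (b := N) (by omega) (by omega)]
    omega

-- A's per-step test, reduced to a bit of x := (a-1) mod 2^np (for 0 < u ≤ np)
theorem cond_iff (a : Int) (u np : Nat) (hu : 0 < u) (hun : u ≤ np) :
    (pyMOD a ((2:Int) ^ u) > (2:Int) ^ (u - 1) ↔
      ((a - 1) % ((2:Int) ^ np)).toNat / 2 ^ (u - 1) % 2 = 1) := by
  obtain ⟨m, rfl⟩ : ∃ m, u = m + 1 := ⟨u - 1, by omega⟩
  have h2 : (2:Int) ≤ 2 ^ (m + 1) := by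
    calc (2:Int) = 2 ^ 1 := by norm_num
    _ ≤ 2 ^ (m + 1) := by apply pow_le_pow_right₀ <;> omega
  rw [pyMOD_eq _ _ h2]
  have hnp : 0 < (2:Int) ^ np := by positivity
  set x : Nat := ((a - 1) % ((2:Int) ^ np)).toNat with hx
  have hxe : (a - 1) % ((2:Int) ^ np) = (x : Int) :=
    (Int.toNat_of_nonneg (Int.emod_nonneg _ (by positivity))).symm
  have hmod : (a - 1) % ((2:Int) ^ (m + 1)) = ((x % 2 ^ (m + 1) : Nat) : Int) := by
    have hdvd : ((2:Int) ^ (m + 1)) ∣ ((2:Int) ^ np) := pow_dvd_pow 2 hun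
    rw [← Int.emod_emod_of_dvd _ hdvd, hxe]
    push_cast
    ring
  rw [hmod]
  simp only [Nat.add_sub_cancel]
  constructor
  · intro h
    exact (mod_ge_iff x m).1 (by exact_mod_cast (by push_cast at h ⊢; omega : (2:Int) ^ m ≤ ((x % 2 ^ (m+1) : Nat) : Int)))
  · intro h
    have := (mod_ge_iff x m).2 h
    have : ((2:Nat) ^ m : Int) ≤ ((x % 2 ^ (m+1) : Nat) : Int) := by exact_mod_cast this
    push_cast at this ⊢
    omega

theorem one_cons (r : List Char) : "1" ++ String.ofList r = String.ofList ('1' :: r) := by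
  rw [show ('1' :: r) = ['1'] ++ r from rfl, ← String.ofList_append]

theorem zero_cons (r : List Char) : "0" ++ String.ofList r = String.ofList ('0' :: r) := by
  rw [show ('0' :: r) = ['0'] ++ r from rfl, ← String.ofList_append]

theorem app_bit (s : String) (c : Prop) [Decidable c] (r : List Char) :
    (s ++ if c then "1" else "0") ++ String.ofList r
      = s ++ String.ofList ((if c then '1' else '0') :: r) := by
  by_cases h : c
  · rw [if_pos h, if_pos h, String.append_assoc]; exact congrArg _ (one_cons r)
  · rw [if_neg h, if_neg h, String.append_assoc]; exact congrArg _ (zero_cons r)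

-- one g-update of the loop body: the two exclusive ifs append exactly one char
theorem step_str (a b : Int) (s : String) :
    (if a > b then (if a ≤ b then s ++ "0" else s) ++ "1" else (if a ≤ b then s ++ "0" else s))
      = s ++ (if a > b then "1" else "0") := by
  by_cases h : a ≤ b
  · rw [if_neg (not_lt.mpr h), if_pos h, if_neg (not_lt.mpr h)]
  · rw [if_pos (lt_of_not_ge h), if_neg h, if_pos (lt_of_not_ge h)]

-- loop invariant: with m iterations of fuel left at r = n - m + 1, the loop appends the m low bits
theorem ntvlLoop_eq (k l n : Int) (hn : 0 < n) :
    ∀ (m : Nat) (g1 gm : String), (m : Int) ≤ n →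
      ntvlLoop k l n (n - m + 1) g1 gm m =
        (g1 ++ String.ofList (natBits ((k - 1) % ((2:Int) ^ n.toNat)).toNat m),
         gm ++ String.ofList (natBits ((l - 1) % ((2:Int) ^ n.toNat)).toNat m)) := by
  intro m
  induction m with
  | zero => intro g1 gm _; simp [ntvlLoop, natBits]
  | succ m ih =>
    intro g1 gm hm
    push_cast at hm
    rw [ntvlLoop, if_pos (by omega)]
    push_cast
    have hu : (n - (n - ((m:Int) + 1) + 1) + 1).toNat = m + 1 := by omega
    simp only [hu, Nat.add_sub_cancel, step_str]
    have hkc := cond_iff k (m + 1) n.toNat (by omega) (by omega)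
    have hlc := cond_iff l (m + 1) n.toNat (by omega) (by omega)
    simp only [Nat.add_sub_cancel] at hkc hlc
    set xk : Nat := ((k - 1) % ((2:Int) ^ n.toNat)).toNat
    set xl : Nat := ((l - 1) % ((2:Int) ^ n.toNat)).toNat
    have step : n - ((m:Int) + 1) + 1 + 1 = n - (m:Int) + 1 := by ring
    rw [step, ih _ _ (by omega)]
    rw [natBits_cons, natBits_cons]
    simp only [hkc, hlc]
    simp only [Prod.mk.injEq]
    exact ⟨app_bit g1 _ _, app_bit gm _ _⟩

-- ===== VERDICT (by name: the statement is the Claim_ definition above) =====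
theorem ntvl_spec : Claim_equal_ntvl := by
  intro k l n _
  unfold Spec_ntvl ntvl ntvl_alt
  by_cases hn : n ≤ 0
  · have : n.toNat = 0 := by omega
    rw [this, if_pos hn]
    rfl
  · rw [if_neg hn]
    have hn' : 0 < n := by omega
    have hloop := ntvlLoop_eq k l n hn' n.toNat "" "" (by omega)
    rw [show (n - (n.toNat : Int) + 1) = 1 by omega] at hloop
    rw [hloop]
    have hpad : ∀ a : Int, fmtBinPad ((a - 1) % ((2:Int) ^ n.toNat)).toNat n.toNat
        = String.ofList (natBits ((a - 1) % ((2:Int) ^ n.toNat)).toNat n.toNat) := by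
      intro a
      have hpos : (0:Int) < (2:Int) ^ n.toNat := by positivity
      unfold fmtBinPad
      rw [fmtBin_pad]
      · have h1 : (a - 1) % ((2:Int) ^ n.toNat) < (2:Int) ^ n.toNat := Int.emod_lt_of_pos _ hpos
        have h0 : 0 ≤ (a - 1) % ((2:Int) ^ n.toNat) := Int.emod_nonneg _ (by positivity)
        have : (((2:Nat) ^ n.toNat : Nat) : Int) = (2:Int) ^ n.toNat := by push_cast; rfl
        omega
      · omega
    simp only [PySem.Int.mod_eq_emod_of_pos (show (0:Int) < (2:Int) ^ n.toNat by positivity),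
      hpad k, hpad l, Prod.mk.injEq]
    constructor <;> simp
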